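-- pv_equiv track=rewrite | github.com/superchessmachine/AF3_WebServerPullDown | src/interaction_job_builder/utils.py | first_token
-- ===== SOURCE A (Python) =====
-- def first_token(cell: str) -> str:
--     if cell is None:
--         return ""
--     value = str(cell).strip()
--     if not value or value == "-":
--         return ""
--     for separator in ("|", ";", ",", " "):
--         if separator in value:
--             value = value.split(separator, 1)[0].strip()
--     if "-" in value:
--         value = value.split("-", 1)[0].strip()
--     return value.upper()
-- ===== SOURCE B (Python) =====
-- def first_token(cell: str) -> str:
--     if cell is None:
--         return ""
--     value = str(cell).strip()
--     prefix_chars = []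
--     for ch in value:
--         if ch in "|;, -":
--             break
--         prefix_chars.append(ch)
--     return "".join(prefix_chars).strip().upper()
-- ===== Notes on version B (the rewrite author's own statement) =====
-- stated objective: simpler
-- what changed: A repeatedly tests membership and re-splits the string once per separator (a four-way loop plus a separate hyphen pass, with explicit guards for the empty and lone-hyphen cases); B does one left-to-right character scan collecting the prefix before the first delimiter character, then strips and uppercases it, with no special-case guards.
import Mathlib
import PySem

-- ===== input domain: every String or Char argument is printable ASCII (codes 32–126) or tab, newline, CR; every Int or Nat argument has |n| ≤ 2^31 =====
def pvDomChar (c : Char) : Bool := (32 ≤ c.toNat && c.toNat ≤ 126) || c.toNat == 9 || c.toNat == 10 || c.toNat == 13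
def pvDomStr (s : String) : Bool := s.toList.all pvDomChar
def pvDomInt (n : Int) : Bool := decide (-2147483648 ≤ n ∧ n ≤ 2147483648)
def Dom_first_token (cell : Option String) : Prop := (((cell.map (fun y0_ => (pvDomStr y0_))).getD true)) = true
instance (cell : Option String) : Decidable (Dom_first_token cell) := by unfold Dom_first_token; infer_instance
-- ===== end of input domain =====

-- B replaces A's per-separator membership-test-and-split passes by one character scan that
-- cuts the stripped string at its first delimiter; same return value on every input.

-- ===== PORT A =====
-- value.split(sep, 1)[0]: the [0] is PySem.List.pyGet? at index 0 with a .getD that is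
-- never reached (str.split always returns a nonempty list, and sep ≠ "" so splitMax? is some)
def cutSepA (v : String) (sep : String) : String :=
  if PySem.Str.isIn sep v then
    PySem.Str.strip ((PySem.List.pyGet? ((PySem.Str.splitMax? v sep 1).getD []) 0).getD v)
  else v

def first_token (cell : Option String) : String :=
  match cell with
  | none => ""
  | some c =>
    let value := PySem.Str.strip c
    if value = "" ∨ value = "-" then ""
    else
      let v1 := ["|", ";", ",", " "].foldl cutSepA value
      let v2 := cutSepA v1 "-"
      PySem.Str.upper v2

-- ===== PORT B =====
def bDelim (c : Char) : Bool := c == '|' || c == ';' || c == ',' || c == ' ' || c == '-'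

-- the for-loop of Source B: collect the characters before the first delimiter
def bPrefix : List Char → List Char
  | [] => []
  | c :: rest => if bDelim c then [] else c :: bPrefix rest

def first_token_alt (cell : Option String) : String :=
  match cell with
  | none => ""
  | some c =>
    let value := PySem.Str.strip c
    PySem.Str.upper (PySem.Str.strip (String.ofList (bPrefix value.toList)))

-- ===== PRECONDITION & SPEC =====
def Spec_first_token (cell : Option String) (out : String) : Prop := out = first_token_alt cell
instance (cell : Option String) (out : String) : Decidable (Spec_first_token cell out) := by unfold Spec_first_token; infer_instance

-- ===== CLAIM (what is proved, stated in full; the proofs are below) =====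
def Claim_equal_first_token : Prop := ∀ (cell : Option String), Dom_first_token cell → Spec_first_token cell (first_token cell)

-- ===== LEMMAS AND PROOFS =====

-- char-level shape of one A step: cut before the first d (if present) and strip
def stepC (v : List Char) (d : Char) : List Char :=
  if d ∈ v then PySem.Chars.strip (v.takeWhile (· ≠ d)) else v

lemma go_zero (d : Char) (fuel : Nat) (l cur : List Char) (acc : List (List Char)) :
    PySem.Chars.splitOnMax.go [d] fuel 0 l cur acc = ((cur.reverse ++ l) :: acc).reverse := by
  cases fuel <;> cases l <;> simp [PySem.Chars.splitOnMax.go]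

lemma go_one (d : Char) (l : List Char) : ∀ (fuel : Nat) (cur : List Char) (acc : List (List Char)),
    l.length ≤ fuel →
    PySem.Chars.splitOnMax.go [d] (fuel + 1) 1 l cur acc =
      if d ∈ l then acc.reverse ++ [cur.reverse ++ l.takeWhile (· ≠ d), (l.dropWhile (· ≠ d)).drop 1]
      else acc.reverse ++ [cur.reverse ++ l] := by
  induction l with
  | nil => intro fuel cur acc _; simp [PySem.Chars.splitOnMax.go]
  | cons c rest ih =>
    intro fuel cur acc hlen
    by_cases hc : c = d
    · subst hc
      have h1 : PySem.Chars.splitOnMax.go [c] (fuel + 1) 1 (c :: rest) cur acc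
          = PySem.Chars.splitOnMax.go [c] fuel 0 rest [] (cur.reverse :: acc) := by
        simp [PySem.Chars.splitOnMax.go, List.isPrefixOf]
      rw [h1, go_zero]
      simp
    · obtain ⟨f', rfl⟩ : ∃ f', fuel = f' + 1 := by
        cases fuel
        · simp at hlen
        · exact ⟨_, rfl⟩
      have hstep : PySem.Chars.splitOnMax.go [d] (f' + 1 + 1) 1 (c :: rest) cur acc
          = PySem.Chars.splitOnMax.go [d] (f' + 1) 1 rest (c :: cur) acc := by
        simp only [PySem.Chars.splitOnMax.go, List.isPrefixOf]
        simp
        intro h; exact absurd h.symm hc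
      rw [hstep, ih f' (c :: cur) acc (by simp at hlen; omega)]
      by_cases hd : d ∈ rest <;> simp [hc, Ne.symm hc, hd]

lemma singleton_isIn (d : Char) (l : List Char) : PySem.Chars.isIn [d] l = true ↔ d ∈ l := by
  rw [PySem.Chars.isIn_iff_infix]
  constructor
  · intro h; exact h.mem (by simp)
  · intro h
    obtain ⟨a, b, rfl⟩ := List.append_of_mem h
    exact ⟨a, b, by simp⟩

-- cutSepA for a single-character separator is stepC on the character lists
lemma cut_toList (v : String) (s : String) (d : Char) (hs : s.toList = [d]) :
    (cutSepA v s).toList = stepC v.toList d := by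
  have hsplit : PySem.Chars.splitOnMax v.toList [d] 1 =
      if d ∈ v.toList then [v.toList.takeWhile (· ≠ d), (v.toList.dropWhile (· ≠ d)).drop 1]
      else [v.toList] := by
    have h1 : PySem.Chars.splitOnMax v.toList [d] 1
        = PySem.Chars.splitOnMax.go [d] (v.toList.length + 1) 1 v.toList [] [] := by
      simp [PySem.Chars.splitOnMax]
    rw [h1, go_one d v.toList (v.toList.length) [] [] le_rfl]
    split <;> simp
  unfold cutSepA stepC
  have hin : PySem.Str.isIn s v = PySem.Chars.isIn [d] v.toList := by
    show PySem.Chars.isIn s.toList v.toList = _; rw [hs]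
  by_cases hd : d ∈ v.toList
  · rw [hin]
    simp only [(singleton_isIn d v.toList).mpr hd, if_pos hd]
    unfold PySem.Str.splitMax?
    rw [hs]
    simp only [PySem.Chars.splitMax?, List.isEmpty_cons, if_neg Bool.false_ne_true]
    rw [hsplit, if_pos hd]
    simp [PySem.List.pyGet?, PySem.List.pyIdx?]
  · have h0 : PySem.Chars.isIn [d] v.toList = false := by
      rcases h : PySem.Chars.isIn [d] v.toList
      · rfl
      · exact absurd ((singleton_isIn d v.toList).mp h) hd
    rw [hin, h0]
    simp [hd]

lemma dw_idem (p : Char → Bool) (w : List Char) :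
    List.dropWhile p (List.dropWhile p w) = List.dropWhile p w := by
  cases h : List.dropWhile p w with
  | nil => simp
  | cons a t =>
    have ha : p a = false := by
      have := List.head_dropWhile_not p (l := w) (by simp [h])
      simpa [h] using this
    simp [ha]

lemma rstrip_idem (w : List Char) : PySem.Chars.rstrip (PySem.Chars.rstrip w) = PySem.Chars.rstrip w := by
  simp [PySem.Chars.rstrip, dw_idem]

lemma rstrip_decomp (w : List Char) :
    w = PySem.Chars.rstrip w ++ (w.reverse.takeWhile PySem.Chars.isspace).reverse := by
  have h := List.takeWhile_append_dropWhile (p := PySem.Chars.isspace) (l := w.reverse)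
  simp only [PySem.Chars.rstrip]
  have h2 := congrArg List.reverse h
  simp only [List.reverse_append, List.reverse_reverse] at h2
  exact h2.symm

lemma rstrip_prefix (w : List Char) : PySem.Chars.rstrip w <+: w := by
  conv_rhs => rw [rstrip_decomp w]
  exact List.prefix_append _ _

lemma rstrip_append_ws (r u : List Char) (hu : ∀ c ∈ u, PySem.Chars.isspace c = true) :
    PySem.Chars.rstrip (r ++ u) = PySem.Chars.rstrip r := by
  have h : List.dropWhile PySem.Chars.isspace u.reverse = [] :=
    List.dropWhile_eq_nil_iff.mpr (by intro x hx; exact hu x (by simpa using hx))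
  simp [PySem.Chars.rstrip, List.dropWhile_append, h]

lemma lstrip_prefix {w l' : List Char} (h : PySem.Chars.lstrip w = w) (hp : l' <+: w) :
    PySem.Chars.lstrip l' = l' := by
  cases l' with
  | nil => simp [PySem.Chars.lstrip]
  | cons a t =>
    obtain ⟨s, rfl⟩ := hp
    have ha : PySem.Chars.isspace a = false := by
      by_contra hc
      have hc' : PySem.Chars.isspace a = true := by simpa using hc
      have h2 := congrArg List.length h
      simp [PySem.Chars.lstrip, hc', List.length_append] at h2
      have h3 := List.length_dropWhile_le (p := PySem.Chars.isspace) (l := t ++ s)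
      simp [List.length_append] at h3
      omega
    simp [PySem.Chars.lstrip, ha]

lemma takeWhile_append_of_mem (d : Char) (r t : List Char) (h : d ∈ r) :
    (r ++ t).takeWhile (· ≠ d) = r.takeWhile (· ≠ d) := by
  rw [List.takeWhile_append]
  split
  next hlen =>
    exfalso
    have heq : r.takeWhile (· ≠ d) = r :=
      (List.takeWhile_sublist _).eq_of_length hlen
    have := List.mem_takeWhile_imp (l := r) (p := (· ≠ d)) (x := d) (by rw [heq]; exact h)
    simp at this
  next => rfl

-- one A step on an rstripped value = rstrip of the cut
lemma step_rstrip (d : Char) (w : List Char) (hw : PySem.Chars.lstrip w = w) :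
    stepC (PySem.Chars.rstrip w) d = PySem.Chars.rstrip (w.takeWhile (· ≠ d)) := by
  set r := PySem.Chars.rstrip w with hr
  set t := (w.reverse.takeWhile PySem.Chars.isspace).reverse with ht
  have hdec : w = r ++ t := rstrip_decomp w
  have htws : ∀ c ∈ t, PySem.Chars.isspace c = true := by
    intro c hc
    exact List.mem_takeWhile_imp (by simpa [ht] using hc)
  unfold stepC
  by_cases hd : d ∈ r
  · rw [if_pos hd]
    have h1 : w.takeWhile (· ≠ d) = r.takeWhile (· ≠ d) := by
      rw [hdec]; exact takeWhile_append_of_mem d r t hd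
    rw [h1]
    have hpre : r.takeWhile (· ≠ d) <+: w :=
      (List.takeWhile_prefix _).trans (rstrip_prefix w)
    have h2 : PySem.Chars.strip (r.takeWhile (· ≠ d)) = PySem.Chars.rstrip (r.takeWhile (· ≠ d)) := by
      unfold PySem.Chars.strip
      rw [lstrip_prefix hw hpre]
    rw [h2]
  · rw [if_neg hd]
    have h1 : w.takeWhile (· ≠ d) = r ++ t.takeWhile (· ≠ d) := by
      rw [hdec, List.takeWhile_append]
      have hall : r.takeWhile (· ≠ d) = r :=
        List.takeWhile_eq_self_iff.mpr (by intro x hx; simp; rintro rfl; exact hd hx)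
      rw [if_pos (by rw [hall])]
    rw [h1, rstrip_append_ws r _ (fun c hc => htws c (List.takeWhile_subset _ hc)), rstrip_idem]

lemma fold_inv (ds : List Char) : ∀ (w : List Char), PySem.Chars.lstrip w = w →
    List.foldl stepC (PySem.Chars.rstrip w) ds =
      PySem.Chars.rstrip (w.takeWhile (fun c => decide (c ∉ ds))) := by
  induction ds with
  | nil =>
    intro w hw
    rw [List.takeWhile_eq_self_iff.mpr (by intro x hx; rfl)]
    rfl
  | cons d ds ih =>
    intro w hw
    rw [List.foldl_cons, step_rstrip d w hw,
        ih _ (lstrip_prefix hw (List.takeWhile_prefix _)),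
        List.takeWhile_takeWhile]
    congr 1
    congr 1
    funext a
    by_cases h1 : a = d <;> by_cases h2 : a ∈ ds <;> simp [h1, h2]

lemma bPrefix_eq_takeWhile (l : List Char) : bPrefix l = l.takeWhile (fun c => !bDelim c) := by
  induction l with
  | nil => rfl
  | cons c rest ih =>
    by_cases h : bDelim c <;> simp [bPrefix, h, ih]

lemma takeWhile_notmem_eq_bPrefix (l : List Char) :
    l.takeWhile (fun c => decide (c ∉ (['|', ';', ',', ' ', '-'] : List Char))) = bPrefix l := by
  rw [bPrefix_eq_takeWhile]
  congr 1
  funext a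
  by_cases h1 : a = '|' <;> by_cases h2 : a = ';' <;> by_cases h3 : a = ',' <;>
    by_cases h4 : a = ' ' <;> by_cases h5 : a = '-' <;> simp [bDelim, h1, h2, h3, h4, h5]

-- ===== VERDICT (by name: the statement is the Claim_ definition above) =====
theorem first_token_spec : Claim_equal_first_token := by
  intro cell _
  unfold Spec_first_token
  cases cell with
  | none => rfl
  | some c =>
    show first_token (some c) = first_token_alt (some c)
    simp only [first_token, first_token_alt]
    generalize hl0 : (PySem.Str.strip c).toList = l
    have hlchars : l = PySem.Chars.strip c.toList := by rw [← hl0]; simp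
    have hlst : PySem.Chars.lstrip l = l := by
      rw [hlchars]
      exact lstrip_prefix (by simpa [PySem.Chars.lstrip] using dw_idem PySem.Chars.isspace c.toList)
        (by simpa [PySem.Chars.strip] using rstrip_prefix (PySem.Chars.lstrip c.toList))
    have hrst : PySem.Chars.rstrip l = l := by
      rw [hlchars]
      simpa [PySem.Chars.strip] using rstrip_idem (PySem.Chars.lstrip c.toList)
    by_cases hg : PySem.Str.strip c = "" ∨ PySem.Str.strip c = "-"
    · rw [if_pos hg]
      rcases hg with hg | hg
      · have hle : l = [] := by rw [← hl0, hg]; rfl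
        rw [hle]; decide
      · have hle : l = ['-'] := by rw [← hl0, hg]; rfl
        rw [hle]; decide
    · rw [if_neg hg]
      -- both sides are Str.upper of something; compare the underlying char lists
      have key : (cutSepA (["|", ";", ",", " "].foldl cutSepA (PySem.Str.strip c)) "-").toList
          = (PySem.Str.strip (String.ofList (bPrefix l))).toList := by
        have hA : (cutSepA (["|", ";", ",", " "].foldl cutSepA (PySem.Str.strip c)) "-").toList
            = List.foldl stepC l ['|', ';', ',', ' ', '-'] := by
          simp only [List.foldl_cons, List.foldl_nil]
          rw [cut_toList _ "-" '-' rfl, cut_toList _ " " ' ' rfl, cut_toList _ "," ',' rfl,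
              cut_toList _ ";" ';' rfl, cut_toList _ "|" '|' rfl, hl0]
        have hfold := fold_inv ['|', ';', ',', ' ', '-'] l hlst
        rw [hrst] at hfold
        have hB : (PySem.Str.strip (String.ofList (bPrefix l))).toList
            = PySem.Chars.rstrip (bPrefix l) := by
          have hbpre : bPrefix l <+: l := by
            rw [bPrefix_eq_takeWhile]; exact List.takeWhile_prefix _
          simp [PySem.Chars.strip, lstrip_prefix hlst hbpre]
        rw [hA, hfold, takeWhile_notmem_eq_bPrefix, hB]
      show PySem.Str.upper _ = PySem.Str.upper _
      unfold PySem.Str.upper PySem.Chars.upper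
      rw [key]
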